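-- pv_equiv track=rewrite | github.com/pypi-data/pypi-mirror-369 | packages/kamae/kamae-2.35.0-py3-none-any.whl/kamae/spark/utils/user_defined_functions.py | ordinal_array_encode_udf
-- ===== SOURCE A (Python) =====
-- from typing import List, Optional, Union
--
-- def ordinal_array_encode_udf(
--     value: List[str], pad_value: Optional[str] = None
-- ) -> List[int]:
--     """
--     User defined Spark function (UDF) to encode a list of strings as an ordinal array.
--     Example:
--     value = ['a', 'b', 'c']
--     ordinal_array = [0, 1, 2]
--
--     :param value: List of strings to encode.
--     :param pad_value: Value to use for padding. Padded values get an index of -1.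
--     :returns: List of integers representing the ordinal array.
--     """
--     string_index_mapping = {pad_value: -1}
--     ordinal_array = []
--     for string in value:
--         if string not in string_index_mapping:
--             string_index_mapping[string] = len(string_index_mapping) - 1
--         ordinal_array.append(string_index_mapping[string])
--     return ordinal_array
-- ===== SOURCE B (Python) =====
-- from typing import List, Optional
--
--
-- def ordinal_array_encode_udf(
--     value: List[str], pad_value: Optional[str] = None
-- ) -> List[int]:
--     # Two separated passes: build the index table from the distinct non-pad
--     # values in first-occurrence order, then emit the output by pure lookup.
--     uniques = [s for s in dict.fromkeys(value) if s != pad_value]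
--     index = {s: i for i, s in enumerate(uniques)}
--     return [-1 if s == pad_value else index[s] for s in value]
-- ===== Notes on version B (the rewrite author's own statement) =====
-- stated objective: simpler
-- what changed: Replaces the single interleaved loop that grows a dict while emitting output with two separated passes: first compute the distinct non-pad values in first-occurrence order (dict.fromkeys) and enumerate them into an index table, then emit the result as a pure lookup comprehension.
import Mathlib
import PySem

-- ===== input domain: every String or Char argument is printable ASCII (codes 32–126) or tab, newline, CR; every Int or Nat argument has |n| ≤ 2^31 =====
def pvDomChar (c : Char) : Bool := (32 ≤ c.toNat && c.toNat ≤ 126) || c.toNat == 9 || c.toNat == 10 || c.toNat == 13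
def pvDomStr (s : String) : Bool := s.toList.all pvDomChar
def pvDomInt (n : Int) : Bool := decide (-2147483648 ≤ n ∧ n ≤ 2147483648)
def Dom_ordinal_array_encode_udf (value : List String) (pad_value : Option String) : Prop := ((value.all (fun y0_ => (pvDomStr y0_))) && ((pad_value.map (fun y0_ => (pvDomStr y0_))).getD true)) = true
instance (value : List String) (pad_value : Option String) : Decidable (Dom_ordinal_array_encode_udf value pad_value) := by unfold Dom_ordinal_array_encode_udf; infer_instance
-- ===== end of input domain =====

-- B separates table building (distinct non-pad values, then an enumerated index) from output emission;
-- A interleaves both in one loop.  Objective: simpler decomposition; same O(n) cost.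

-- ===== PORT A =====
-- one loop: grow the dict (pad_value pre-mapped to -1, new strings get len(dict)-1) while appending lookups
def ordinal_array_encode_udf (value : List String) (pad_value : Option String) : List Int :=
  (value.foldl
    (fun (st : PySem.Dict (Option String) Int × List Int) s =>
      let d := if st.1.contains (some s) then st.1
               else st.1.insert (some s) ((st.1.size : Int) - 1)
      -- A's 'string_index_mapping[string]' never misses (the key was just ensured): getD 0 is exact here
      (d, st.2 ++ [d.getD (some s) 0]))
    ((PySem.Dict.empty).insert pad_value (-1), [])).2

-- ===== PORT B =====
def ordinal_array_encode_udf_alt (value : List String) (pad_value : Option String) : List Int :=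
  let uniques : List String := (PySem.List.dedup value).filter (fun s => some s != pad_value)
  let index : PySem.Dict String Int :=
    (PySem.List.enumerate uniques).foldl (fun d p => d.insert p.2 p.1) PySem.Dict.empty
  -- B's 'index[s]' never misses (s ≠ pad_value is in uniques): getD 0 is exact here
  value.map (fun s => if some s == pad_value then (-1 : Int) else index.getD s 0)

-- ===== PRECONDITION & SPEC =====
def Spec_ordinal_array_encode_udf (value : List String) (pad_value : Option String) (out : List Int) : Prop := out = ordinal_array_encode_udf_alt value pad_value
instance (value : List String) (pad_value : Option String) (out : List Int) : Decidable (Spec_ordinal_array_encode_udf value pad_value out) := by unfold Spec_ordinal_array_encode_udf; infer_instance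

-- ===== CLAIM (what is proved, stated in full; the proofs are below) =====
def Claim_equal_ordinal_array_encode_udf : Prop := ∀ (value : List String) (pad_value : Option String), Dom_ordinal_array_encode_udf value pad_value → Spec_ordinal_array_encode_udf value pad_value (ordinal_array_encode_udf value pad_value)

-- ===== LEMMAS AND PROOFS =====

-- the distinct-non-pad list after processing one more element
def uStep (pad : Option String) (u : List String) (s : String) : List String :=
  if some s == pad || u.contains s then u else u ++ [s]

-- invariant of A's dict after processing a prefix whose distinct non-pad values (in order) are u
def InvA (pad : Option String) (u : List String) (d : PySem.Dict (Option String) Int) : Prop :=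
  d.size = u.length + 1 ∧
  (∀ s : String, d.get? (some s) =
     if pad = some s then some (-1)
     else (PySem.List.index? u s).map Int.ofNat)

lemma mem_uStep {pad : Option String} {u : List String} {s : String} (t : String)
    (h : t ∈ u) : t ∈ uStep pad u s := by
  unfold uStep; split_ifs with h1
  · exact h
  · exact List.mem_append_left _ h

lemma self_mem_uStep (pad : Option String) (u : List String) (s : String)
    (hp : pad ≠ some s) : s ∈ uStep pad u s := by
  unfold uStep
  split_ifs with h1
  · simp only [Bool.or_eq_true, beq_iff_eq, List.contains_eq_mem, decide_eq_true_eq] at h1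
    rcases h1 with h1 | h1
    · exact absurd h1.symm hp
    · exact h1
  · exact List.mem_append_right _ (List.mem_singleton_self s)

lemma index?_uStep_of_mem {pad : Option String} {u : List String} {s : String} (t : String)
    (h : t ∈ u) : PySem.List.index? (uStep pad u s) t = PySem.List.index? u t := by
  unfold uStep; split_ifs with h1
  · rfl
  · exact PySem.List.index?_append_of_mem _ h

lemma index?_ufold_of_mem (pad : Option String) :
    ∀ (rest u : List String) (t : String), t ∈ u →
      PySem.List.index? (rest.foldl (uStep pad) u) t = PySem.List.index? u t := by
  intro rest
  induction rest with
  | nil => intro u t h; rfl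
  | cons s rest ih =>
      intro u t h
      simp only [List.foldl_cons]
      rw [ih (uStep pad u s) t (mem_uStep t h), index?_uStep_of_mem t h]

lemma stepA_inv (pad : Option String) (u : List String) (d : PySem.Dict (Option String) Int)
    (s : String) (hI : InvA pad u d) :
    InvA pad (uStep pad u s)
      (if d.contains (some s) then d else d.insert (some s) ((d.size : Int) - 1)) := by
  obtain ⟨hsz, hget⟩ := hI
  by_cases hc : d.contains (some s) = true
  · -- already present: s is pad or a member of u; uStep leaves u unchanged
    have hc' := hc
    rw [PySem.Dict.contains_eq_isSome_get?, hget s] at hc'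
    have hu : uStep pad u s = u := by
      unfold uStep
      split_ifs with h1
      · rfl
      exfalso
      simp only [Bool.or_eq_true, beq_iff_eq, List.contains_eq_mem, decide_eq_true_eq,
        not_or] at h1
      obtain ⟨h1a, h1b⟩ := h1
      by_cases hp : pad = some s
      · exact h1a hp.symm
      · rw [if_neg hp, Option.isSome_map] at hc'
        exact h1b ((PySem.List.index?_isSome_iff u s).mp hc')
    rw [if_pos hc, hu]
    exact ⟨hsz, hget⟩
  · -- fresh non-pad string: insert it with index u.length
    have hcontains : d.contains (some s) = false := by simpa using hc
    have hc' : ((if pad = some s then some (-1 : Int)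
        else (PySem.List.index? u s).map Int.ofNat)).isSome = false := by
      rw [← hget s, ← PySem.Dict.contains_eq_isSome_get?]
      exact hcontains
    have hp : pad ≠ some s := by
      intro h
      rw [if_pos h] at hc'
      simp at hc'
    have hnm : s ∉ u := by
      intro h
      rw [if_neg hp, Option.isSome_map] at hc'
      rw [(PySem.List.index?_isSome_iff u s).mpr h] at hc'
      exact Bool.true_eq_false.mp hc'
    have hu : uStep pad u s = u ++ [s] := by
      unfold uStep
      rw [if_neg]
      simp only [Bool.or_eq_true, beq_iff_eq, List.contains_eq_mem, decide_eq_true_eq, not_or]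
      exact ⟨fun h => hp h.symm, hnm⟩
    rw [if_neg (by simp [hcontains]), hu]
    constructor
    · rw [PySem.Dict.size_insert, if_neg (by simp [hcontains])]
      simp [hsz]
    · intro t
      rw [PySem.Dict.get?_insert]
      by_cases ht : t = s
      · subst ht
        rw [if_pos rfl, if_neg hp, PySem.List.index?_append_singleton_self u t hnm]
        simp only [Option.map_some]
        congr 1
        rw [hsz, Int.ofNat_eq_natCast]
        push_cast
        ring
      · rw [if_neg (fun h => ht (by injection h)), hget t]
        by_cases htp : pad = some t
        · rw [if_pos htp, if_pos htp]
        · rw [if_neg htp, if_neg htp]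
          by_cases htu : t ∈ u
          · rw [PySem.List.index?_append_of_mem _ htu]
          · have h1 : PySem.List.index? u t = none :=
              (PySem.List.index?_eq_none_iff u t).mpr htu
            have h2 : PySem.List.index? (u ++ [s]) t = none := by
              rw [PySem.List.index?_eq_none_iff]
              simp [htu, ht]
            rw [h1, h2]

lemma loopA_spec (pad : Option String) :
    ∀ (rest : List String) (d : PySem.Dict (Option String) Int) (acc : List Int)
      (u : List String), InvA pad u d →
      (rest.foldl
        (fun (st : PySem.Dict (Option String) Int × List Int) s =>
          let d := if st.1.contains (some s) then st.1
                   else st.1.insert (some s) ((st.1.size : Int) - 1)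
          (d, st.2 ++ [d.getD (some s) 0]))
        (d, acc)).2
      = acc ++ rest.map (fun s =>
          if pad = some s then (-1 : Int)
          else Int.ofNat ((PySem.List.index? (rest.foldl (uStep pad) u) s).getD 0)) := by
  intro rest
  induction rest with
  | nil => intro d acc u _; simp
  | cons s rest ih =>
      intro d acc u hI
      have hI' := stepA_inv pad u d s hI
      simp only [List.foldl_cons]
      set d' := if d.contains (some s) then d else d.insert (some s) ((d.size : Int) - 1)
        with hd'
      have hval : d'.getD (some s) 0 =
          if pad = some s then (-1 : Int)
          else Int.ofNat ((PySem.List.index? (uStep pad u s) s).getD 0) := by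
        obtain ⟨_, hget⟩ := hI'
        rw [PySem.Dict.getD_eq_get?_getD, hget s]
        by_cases hp : pad = some s
        · rw [if_pos hp, if_pos hp]; rfl
        · rw [if_neg hp, if_neg hp]
          obtain ⟨k, hk⟩ := Option.isSome_iff_exists.mp
            ((PySem.List.index?_isSome_iff _ s).mpr (self_mem_uStep pad u s hp))
          rw [hk]
          rfl
      rw [ih d' (acc ++ [d'.getD (some s) 0]) (uStep pad u s) hI', hval]
      simp only [List.map_cons, List.append_assoc, List.singleton_append]
      by_cases hp : pad = some s
      · rw [if_pos hp, if_pos hp]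
      · rw [if_neg hp, if_neg hp,
          index?_ufold_of_mem pad rest (uStep pad u s) s (self_mem_uStep pad u s hp)]

lemma inv_init (pad : Option String) : InvA pad [] ((PySem.Dict.empty).insert pad (-1)) := by
  constructor
  · rw [PySem.Dict.size_insert]
    simp [PySem.Dict.contains_empty, PySem.Dict.size_empty]
  · intro s
    rw [PySem.Dict.get?_insert]
    by_cases h : (some s : Option String) = pad
    · rw [if_pos h, if_pos h.symm]
    · rw [if_neg h, if_neg (fun h' => h h'.symm), PySem.Dict.get?_empty]
      simp [PySem.List.index?]

-- the two pass-one computations (A's incremental distinct list, B's filtered dedup) coincide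
lemma filter_add (pad : Option String) (w : List String) (s : String) :
    (PySem.Set.add w s).filter (fun t => some t != pad)
      = uStep pad (w.filter (fun t => some t != pad)) s := by
  by_cases hw : s ∈ w
  · have h1 : PySem.Set.add w s = w := by
      unfold PySem.Set.add
      rw [if_pos (by simpa [List.contains_eq_mem] using hw)]
    rw [h1]
    unfold uStep
    by_cases hq : some s = pad
    · rw [if_pos (by simp [hq])]
    · rw [if_pos]
      simp only [Bool.or_eq_true, List.contains_eq_mem, decide_eq_true_eq]
      right
      exact List.mem_filter.mpr ⟨hw, by simpa using hq⟩
  · have h1 : PySem.Set.add w s = w ++ [s] := by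
      unfold PySem.Set.add
      rw [if_neg (by simpa [List.contains_eq_mem] using hw)]
    rw [h1, List.filter_append]
    unfold uStep
    by_cases hq : some s = pad
    · rw [if_pos (by simp [hq])]
      simp [hq]
    · rw [if_neg]
      · simp [hq]
      · simp only [Bool.or_eq_true, beq_iff_eq, List.contains_eq_mem, decide_eq_true_eq,
          not_or]
        exact ⟨hq, fun h => hw (List.mem_filter.mp h).1⟩

lemma filter_ofList (pad : Option String) :
    ∀ (rest w : List String),
      (rest.foldl PySem.Set.add w).filter (fun t => some t != pad)
        = rest.foldl (uStep pad) (w.filter (fun t => some t != pad)) := by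
  intro rest
  induction rest with
  | nil => intro w; rfl
  | cons s rest ih =>
      intro w
      simp only [List.foldl_cons]
      rw [ih (PySem.Set.add w s), filter_add]

lemma uniques_eq (value : List String) (pad : Option String) :
    (PySem.List.dedup value).filter (fun t => some t != pad)
      = value.foldl (uStep pad) [] := by
  have h := filter_ofList pad value []
  simpa [PySem.Set.ofList_eq_foldl] using h

-- (k, s) sits in the enumeration at s's index
lemma mem_enumerate_of_index? :
    ∀ (u : List String) (s : String) (k : Nat) (st : Int),
      PySem.List.index? u s = some k →
      ((st + (k : Int), s) ∈ PySem.List.enumerate u st) := by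
  intro u
  induction u with
  | nil => intro s k st h; simp [PySem.List.index?] at h
  | cons x u ih =>
      intro s k st h
      rw [PySem.List.enumerate_cons]
      by_cases hx : x = s
      · subst hx
        rw [PySem.List.index?_cons_self] at h
        obtain rfl : k = 0 := by injection h with h; exact h.symm
        simp
      · rw [PySem.List.index?_cons_of_ne u hx] at h
        obtain ⟨k', hk', rfl⟩ := Option.map_eq_some_iff.mp h
        right
        have hmem := ih s k' (st + 1) hk'
        have he : (st + ((k' + 1 : Nat) : Int)) = st + 1 + (k' : Int) := by push_cast; ring
        rw [he]
        exact hmem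

lemma index_getD (uniques : List String) (hnd : uniques.Nodup) (s : String) (k : Nat)
    (hk : PySem.List.index? uniques s = some k) :
    ((PySem.List.enumerate uniques).foldl
        (fun (d : PySem.Dict String Int) p => d.insert p.2 p.1) PySem.Dict.empty).getD s 0
      = (k : Int) := by
  have hitems : ((PySem.List.enumerate uniques).foldl
      (fun (d : PySem.Dict String Int) p => d.insert p.2 p.1) PySem.Dict.empty).items
      = (PySem.Dict.empty : PySem.Dict String Int).items
        ++ (PySem.List.enumerate uniques).map (fun p => (p.2, p.1)) := by
    exact PySem.Dict.items_foldl_insert_fresh (PySem.List.enumerate uniques)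
      (fun p => p.2) (fun p => p.1) PySem.Dict.empty
      (fun a _ => PySem.Dict.contains_empty _)
      (by rw [PySem.List.map_snd_enumerate]; exact hnd)
  have hkeysnd : ((PySem.List.enumerate uniques).foldl
      (fun (d : PySem.Dict String Int) p => d.insert p.2 p.1) PySem.Dict.empty).keys.Nodup := by
    have hn := PySem.Dict.nodup_keys_foldl_insert_key (PySem.List.enumerate uniques)
      (fun p => p.2) (fun _ p => p.1) PySem.Dict.empty (by simp [PySem.Dict.keys_empty])
    exact hn
  refine PySem.Dict.getD_of_mem_items _ ?_ hkeysnd 0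
  rw [hitems]
  apply List.mem_append_right
  have hmem := mem_enumerate_of_index? uniques s k 0 hk
  rw [zero_add] at hmem
  exact List.mem_map.mpr ⟨((k : Int), s), hmem, rfl⟩

-- ===== VERDICT (by name: the statement is the Claim_ definition above) =====
theorem ordinal_array_encode_udf_spec : Claim_equal_ordinal_array_encode_udf := by
  intro value pad _
  unfold Spec_ordinal_array_encode_udf ordinal_array_encode_udf ordinal_array_encode_udf_alt
  rw [loopA_spec pad value _ [] [] (inv_init pad)]
  rw [List.nil_append]
  apply List.map_congr_left
  intro s hs
  by_cases hp : pad = some s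
  · rw [if_pos hp, if_pos (by simp [hp])]
  · rw [if_neg hp, if_neg (by simp; exact fun h => hp h.symm)]
    have hsu : s ∈ (PySem.List.dedup value).filter (fun t => some t != pad) := by
      apply List.mem_filter.mpr
      refine ⟨(PySem.List.mem_dedup value s).mpr hs, ?_⟩
      simpa using fun h => hp h.symm
    have hnd : ((PySem.List.dedup value).filter (fun t => some t != pad)).Nodup :=
      (PySem.List.nodup_dedup value).filter _
    obtain ⟨k, hk⟩ := Option.isSome_iff_exists.mp
      ((PySem.List.index?_isSome_iff _ s).mpr hsu)
    rw [index_getD _ hnd s k hk]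
    rw [uniques_eq value pad] at hk
    rw [hk]
    rfl
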